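-- pv_equiv track=rewrite | github.com/ig-hwang/gtc2026 | generate_html.py | render_nav_items
-- ===== SOURCE A (Python) =====
-- def category_icon(category: str) -> str:
--     icons = {
--         "Keynote": "🎤",
--         "Hardware": "⚡",
--         "AI Software": "🧠",
--         "Robotics": "🤖",
--         "Autonomous Vehicles": "🚗",
--         "Gaming": "🎮",
--         "Cloud & Enterprise": "☁️",
--         "Healthcare": "🏥",
--         "Space": "🛸",
--         "General": "📋",
--     }
--     return icons.get(category, "📋")
--
-- def escape_html(text: str) -> str:
--     return (
--         str(text)
--         .replace("&", "&amp;")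
--         .replace("<", "&lt;")
--         .replace(">", "&gt;")
--         .replace('"', "&quot;")
--         .replace("'", "&#39;")
--     )
--
-- def render_nav_items(analyses: list[dict]) -> str:
--     html = ""
--     # 카테고리별 그룹
--     categories = {}
--     for a in analyses:
--         cat = a.get("category", "General")
--         categories.setdefault(cat, []).append(a)
--
--     for cat, items in categories.items():
--         icon = category_icon(cat)
--         html += f'<div class="nav-section">{escape_html(cat)}</div>\n'
--         for a in items:
--             sid = escape_html(a.get("session_id", ""))
--             title = escape_html(a.get("title", sid)[:40])
--             html += (
--                 f'<a class="nav-item" onclick="showPage(\'{sid}\')">'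
--                 f'<span class="nav-icon">{icon}</span> {title}</a>\n'
--             )
--     return html
-- ===== SOURCE B (Python) =====
-- def category_icon(category: str) -> str:
--     icons = {
--         "Keynote": "🎤",
--         "Hardware": "⚡",
--         "AI Software": "🧠",
--         "Robotics": "🤖",
--         "Autonomous Vehicles": "🚗",
--         "Gaming": "🎮",
--         "Cloud & Enterprise": "☁️",
--         "Healthcare": "🏥",
--         "Space": "🛸",
--         "General": "📋",
--     }
--     return icons.get(category, "📋")
--
-- def escape_html(text: str) -> str:
--     return (
--         str(text)
--         .replace("&", "&amp;")
--         .replace("<", "&lt;")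
--         .replace(">", "&gt;")
--         .replace('"', "&quot;")
--         .replace("'", "&#39;")
--     )
--
-- def render_entry(icon: str, a: dict) -> str:
--     sid = escape_html(a.get("session_id", ""))
--     title = escape_html(a.get("title", sid)[:40])
--     return (
--         f'<a class="nav-item" onclick="showPage(\'{sid}\')">'
--         f'<span class="nav-icon">{icon}</span> {title}</a>\n'
--     )
--
-- def render_nav_items(analyses: list[dict]) -> str:
--     # distinct categories in first-appearance order, then filter per category
--     order = list(dict.fromkeys(a.get("category", "General") for a in analyses))
--     html = ""
--     for cat in order:
--         html += f'<div class="nav-section">{escape_html(cat)}</div>\n'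
--         icon = category_icon(cat)
--         for a in analyses:
--             if a.get("category", "General") != cat:
--                 continue
--             html += render_entry(icon, a)
--     return html
-- ===== Notes on version B (the rewrite author's own statement) =====
-- stated objective: alternative
-- what changed: Replaces A's grouping-dict index (setdefault/append, then iterate dict items) with a first-appearance ordered list of distinct categories (dict.fromkeys) followed by one filtering pass over the whole input per category.
import Mathlib
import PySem

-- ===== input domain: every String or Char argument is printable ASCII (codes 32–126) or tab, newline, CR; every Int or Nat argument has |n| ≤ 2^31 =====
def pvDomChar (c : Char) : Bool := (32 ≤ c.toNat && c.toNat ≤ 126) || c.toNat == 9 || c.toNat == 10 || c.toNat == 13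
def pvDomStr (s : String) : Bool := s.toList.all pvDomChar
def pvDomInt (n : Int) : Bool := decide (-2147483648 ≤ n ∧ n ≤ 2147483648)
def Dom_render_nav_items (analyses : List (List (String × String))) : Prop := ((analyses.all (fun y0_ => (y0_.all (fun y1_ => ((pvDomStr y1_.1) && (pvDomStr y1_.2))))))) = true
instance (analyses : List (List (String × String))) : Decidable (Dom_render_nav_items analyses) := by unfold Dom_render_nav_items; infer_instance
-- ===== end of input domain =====

-- B regroups by repeated filtering over a first-appearance category list instead of A's grouping dict; objective: alternative (same output, different traversal), not faster.

-- shared module helpers (identical in Source A and Source B)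
def pyDictGet (a : List (String × String)) (k dflt : String) : String :=
  (PySem.Dict.mk a).getD k dflt

def categoryIcon (category : String) : String :=
  (PySem.Dict.ofList [("Keynote", "🎤"), ("Hardware", "⚡"), ("AI Software", "🧠"),
    ("Robotics", "🤖"), ("Autonomous Vehicles", "🚗"), ("Gaming", "🎮"),
    ("Cloud & Enterprise", "☁️"), ("Healthcare", "🏥"), ("Space", "🛸"),
    ("General", "📋")]).getD category "📋"

def escapeHtml (text : String) : String :=
  PySem.Str.replace (PySem.Str.replace (PySem.Str.replace (PySem.Str.replace
    (PySem.Str.replace text "&" "&amp;") "<" "&lt;") ">" "&gt;") "\"" "&quot;") "'" "&#39;"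

-- ===== PORT A =====
def render_nav_items (analyses : List (List (String × String))) : String :=
  let categories : PySem.Dict String (List (List (String × String))) :=
    analyses.foldl (fun d a =>
      let cat := pyDictGet a "category" "General"
      d.modify cat [] (fun l => l ++ [a])) PySem.Dict.empty
  categories.items.foldl (fun html p =>
    let cat := p.1
    let items := p.2
    let icon := categoryIcon cat
    let html := html ++ "<div class=\"nav-section\">" ++ escapeHtml cat ++ "</div>\n"
    items.foldl (fun html a =>
      let sid := escapeHtml (pyDictGet a "session_id" "")
      let title := escapeHtml (PySem.Str.slice (pyDictGet a "title" sid) none (some 40))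
      html ++ "<a class=\"nav-item\" onclick=\"showPage('" ++ sid ++ "')\">"
           ++ "<span class=\"nav-icon\">" ++ icon ++ "</span> " ++ title ++ "</a>\n") html) ""

-- ===== PORT B =====
def renderEntry (icon : String) (a : List (String × String)) : String :=
  let sid := escapeHtml (pyDictGet a "session_id" "")
  let title := escapeHtml (PySem.Str.slice (pyDictGet a "title" sid) none (some 40))
  "<a class=\"nav-item\" onclick=\"showPage('" ++ sid ++ "')\">"
    ++ "<span class=\"nav-icon\">" ++ icon ++ "</span> " ++ title ++ "</a>\n"

def render_nav_items_alt (analyses : List (List (String × String))) : String :=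
  let order := PySem.List.dedup (analyses.map (fun a => pyDictGet a "category" "General"))
  order.foldl (fun html cat =>
    let html := html ++ "<div class=\"nav-section\">" ++ escapeHtml cat ++ "</div>\n"
    let icon := categoryIcon cat
    analyses.foldl (fun html a =>
      if pyDictGet a "category" "General" ≠ cat then html
      else html ++ renderEntry icon a) html) ""

-- ===== PRECONDITION & SPEC =====
def Spec_render_nav_items (analyses : List (List (String × String))) (out : String) : Prop := out = render_nav_items_alt analyses
instance (analyses : List (List (String × String))) (out : String) : Decidable (Spec_render_nav_items analyses out) := by unfold Spec_render_nav_items; infer_instance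

-- ===== CLAIM (what is proved, stated in full; the proofs are below) =====
def Claim_equal_render_nav_items : Prop := ∀ (analyses : List (List (String × String))), Dom_render_nav_items analyses → Spec_render_nav_items analyses (render_nav_items analyses)

-- ===== LEMMAS AND PROOFS =====

-- A's grouping dict, characterised: its items list is the first-appearance category list
-- paired with the per-category filters of the input.
theorem groupDict_items (analyses : List (List (String × String))) :
    (analyses.foldl (fun d a =>
        d.modify (pyDictGet a "category" "General") [] (fun l => l ++ [a]))
        (PySem.Dict.empty : PySem.Dict String (List (List (String × String))))).items
      = (PySem.List.dedup (analyses.map (fun a => pyDictGet a "category" "General"))).map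
          (fun c => (c, analyses.filter (fun a => pyDictGet a "category" "General" == c))) := by
  have hnd := PySem.Dict.nodup_keys_foldl_modify_key analyses
    (fun a => pyDictGet a "category" "General") []
    (fun _ a => fun l => l ++ [a]) PySem.Dict.empty PySem.Dict.nodup_keys_empty
  have hkeys := PySem.Dict.keys_foldl_modify_key analyses
    (fun a => pyDictGet a "category" "General") []
    (fun _ a => fun l => l ++ [a]) PySem.Dict.empty
  have hgetD : ∀ c, (analyses.foldl (fun d a =>
        d.modify (pyDictGet a "category" "General") [] (fun l => l ++ [a]))
        (PySem.Dict.empty : PySem.Dict String (List (List (String × String))))).getD c []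
      = analyses.filter (fun a => pyDictGet a "category" "General" == c) := by
    intro c
    have hmap : (analyses.map (fun a => (pyDictGet a "category" "General", a))).foldl
        (fun d p => d.modify p.1 [] (fun l => l ++ [p.2])) PySem.Dict.empty
        = analyses.foldl (fun d a =>
            d.modify (pyDictGet a "category" "General") [] (fun l => l ++ [a]))
            PySem.Dict.empty := List.foldl_map
    rw [← hmap, PySem.Dict.getD_foldl_modify_append]
    simp [List.filter_map, Function.comp_def, List.map_map]
  rw [PySem.Dict.items_eq_map_keys _ hnd []]
  rw [hkeys, PySem.Dict.keys_empty, PySem.Set.update_nil_left, ← PySem.List.dedup_eq_ofList]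
  exact List.map_congr_left (fun c _ => by rw [hgetD c])

theorem render_nav_items_spec : Claim_equal_render_nav_items := by
  intro analyses _
  unfold Spec_render_nav_items render_nav_items render_nav_items_alt
  simp only []
  rw [groupDict_items, List.foldl_map]
  have hfun : (fun (html : String) (c : String) =>
      (analyses.filter (fun a => pyDictGet a "category" "General" == c)).foldl
        (fun html a =>
          let sid := escapeHtml (pyDictGet a "session_id" "")
          let title := escapeHtml (PySem.Str.slice (pyDictGet a "title" sid) none (some 40))
          html ++ "<a class=\"nav-item\" onclick=\"showPage('" ++ sid ++ "')\">"
               ++ "<span class=\"nav-icon\">" ++ categoryIcon c ++ "</span> " ++ title ++ "</a>\n")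
        (html ++ "<div class=\"nav-section\">" ++ escapeHtml c ++ "</div>\n"))
    = (fun (html : String) (cat : String) =>
      analyses.foldl
        (fun html a =>
          if pyDictGet a "category" "General" ≠ cat then html
          else html ++ renderEntry (categoryIcon cat) a)
        (html ++ "<div class=\"nav-section\">" ++ escapeHtml cat ++ "</div>\n")) := by
    funext html c
    rw [List.foldl_filter]
    congr 1
    funext x a
    by_cases h : pyDictGet a "category" "General" = c
    · simp [h, renderEntry, String.append_assoc]
    · simp [h]
  rw [hfun]
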